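-- pv_equiv track=rewrite | github.com/kyzi007/ugame | server.py | cut_map_area
-- ===== SOURCE A (Python) =====
-- def cut_map_area(start, all_cells, area_map_size, map_size):
--     view_cells = []
--     all_cells = map(lambda x: int(x), all_cells)
--
--     # area left top cell
--     all_cells = list(all_cells)
--     for i in range(0, area_map_size):
--         start_ = start + map_size * i
--         view_cells += filter(lambda x: start_ <= x < start_ + area_map_size, all_cells)
--
--     return view_cells
-- ===== SOURCE B (Python) =====
-- def cut_map_area(start, all_cells, area_map_size, map_size):
--     # Single pass over the cells: each cell's contiguous interval of matching
--     # rows is computed by floor/ceil division, the cell is bucketed per row,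
--     # and the row buckets are concatenated in order.
--     buckets = {}
--     for x in all_cells:
--         d = int(x) - start
--         lo = max(0, -((area_map_size - 1 - d) // map_size))   # ceil((d - area + 1) / map_size)
--         hi = min(area_map_size - 1, d // map_size)
--         for i in range(lo, hi + 1):
--             buckets.setdefault(i, []).append(int(x))
--     out = []
--     for i in range(area_map_size):
--         out += buckets.get(i, [])
--     return out
-- ===== Notes on version B (the rewrite author's own statement) =====
-- stated objective: faster
-- what changed: A rescans the whole cell list once per row of the sub-area; B makes one pass over the cells, computing each cell's contiguous interval of matching rows by floor/ceil division and bucketing it per row, then concatenates the buckets; Pre_ restricts to positive map_size, the function's natural domain (a map row stride), where A's values for zero or negative strides are outside the task's meaning.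
-- outside the precondition, e.g. on cut_map_area(0, [0], 2, 0): A returns [0, 0], B raises ZeroDivisionError; on cut_map_area(0, [0], 2, -1): A returns [0, 0], B returns []
import Mathlib
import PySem

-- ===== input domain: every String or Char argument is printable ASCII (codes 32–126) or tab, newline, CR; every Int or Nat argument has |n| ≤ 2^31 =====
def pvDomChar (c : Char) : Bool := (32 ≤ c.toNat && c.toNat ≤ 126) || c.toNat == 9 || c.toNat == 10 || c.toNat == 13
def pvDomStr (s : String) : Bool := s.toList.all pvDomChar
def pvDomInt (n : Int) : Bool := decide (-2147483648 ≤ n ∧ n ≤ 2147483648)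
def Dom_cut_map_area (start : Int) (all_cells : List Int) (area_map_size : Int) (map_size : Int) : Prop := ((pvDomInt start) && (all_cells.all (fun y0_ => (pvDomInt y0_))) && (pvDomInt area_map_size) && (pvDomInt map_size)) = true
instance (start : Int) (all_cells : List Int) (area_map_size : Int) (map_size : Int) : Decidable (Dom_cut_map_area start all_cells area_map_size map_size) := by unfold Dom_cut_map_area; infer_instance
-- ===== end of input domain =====

-- B replaces A's per-row scan of all cells by one pass that buckets each cell into its
-- interval of matching rows (computed by floor/ceil division), then concatenates the buckets.

-- ===== PORT A =====
def cut_map_area (start : Int) (all_cells : List Int) (area_map_size : Int) (map_size : Int) : List Int :=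
  let view_cells : List Int := []
  let all_cells := all_cells.map (fun x => x)   -- list(map(lambda x: int(x), all_cells)); int(x) is the identity on ints
  (PySem.List.pyRange 0 area_map_size).foldl
    (fun view_cells i =>
      let start_ := start + map_size * i
      view_cells ++ all_cells.filter (fun x => decide (start_ ≤ x) && decide (x < start_ + area_map_size)))
    view_cells

-- ===== PORT B =====
-- Source B's lo..hi row-interval for one cell; its range(lo, hi+1) call
def pvRowRange (start : Int) (area_map_size : Int) (map_size : Int) (x : Int) : List Int :=
  let d := x - start
  let lo := max 0 (-(PySem.Int.floordiv (area_map_size - 1 - d) map_size))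
  let hi := min (area_map_size - 1) (PySem.Int.floordiv d map_size)
  PySem.List.pyRange lo (hi + 1)

def cut_map_area_alt (start : Int) (all_cells : List Int) (area_map_size : Int) (map_size : Int) : List Int :=
  let buckets : PySem.Dict Int (List Int) :=
    all_cells.foldl
      (fun b x =>
        (pvRowRange start area_map_size map_size x).foldl
          (fun b i => b.modify i [] (fun l => l ++ [x])) b)   -- buckets.setdefault(i, []).append(int(x))
      PySem.Dict.empty
  (PySem.List.pyRange 0 area_map_size).foldl (fun out i => out ++ buckets.getD i []) []

-- ===== PRECONDITION & SPEC =====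
-- Pre_ restricts to positive map_size: the stride of a map row is positive in the task's
-- natural domain; A still returns values for zero/negative strides (see the claim's cites),
-- but those inputs are outside the function's meaning and B's division needs a positive stride.
def Pre_cut_map_area (start : Int) (all_cells : List Int) (area_map_size : Int) (map_size : Int) : Prop := 0 < map_size
instance (start : Int) (all_cells : List Int) (area_map_size : Int) (map_size : Int) : Decidable (Pre_cut_map_area start all_cells area_map_size map_size) := by unfold Pre_cut_map_area; infer_instance
def pvWitness_cut_map_area : Int × List Int × Int × Int := (10, [9, 10, 12, 25, 26, 40], 3, 15)
def Spec_cut_map_area (start : Int) (all_cells : List Int) (area_map_size : Int) (map_size : Int) (out : List Int) : Prop := out = cut_map_area_alt start all_cells area_map_size map_size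
instance (start : Int) (all_cells : List Int) (area_map_size : Int) (map_size : Int) (out : List Int) : Decidable (Spec_cut_map_area start all_cells area_map_size map_size out) := by unfold Spec_cut_map_area; infer_instance

-- ===== CLAIM (what is proved, stated in full; the proofs are below) =====
def Claim_equal_cut_map_area : Prop := ∀ (start : Int) (all_cells : List Int) (area_map_size : Int) (map_size : Int), Dom_cut_map_area start all_cells area_map_size map_size → Pre_cut_map_area start all_cells area_map_size map_size → Spec_cut_map_area start all_cells area_map_size map_size (cut_map_area start all_cells area_map_size map_size)

-- ===== LEMMAS AND PROOFS =====

-- a step-1 range contains each value at most once: filtering for one value yields [i] or []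
theorem pyRange_filter_eq (hi : Int) : ∀ (n : Nat) (lo i : Int), (hi - lo).toNat = n →
    (PySem.List.pyRange lo hi).filter (fun j => j == i) =
      if lo ≤ i ∧ i < hi then [i] else [] := by
  intro n
  induction n with
  | zero =>
    intro lo i h
    have hnil : PySem.List.pyRange lo hi = [] := by
      apply List.eq_nil_iff_forall_not_mem.mpr
      intro x hx
      have := PySem.List.mem_pyRange_one.mp hx
      omega
    rw [hnil]
    have : ¬ (lo ≤ i ∧ i < hi) := by omega
    simp [this]
  | succ n ih =>
    intro lo i h
    have hlt : lo < hi := by omega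
    rw [PySem.List.pyRange_one_cons hlt, List.filter_cons]
    by_cases he : lo = i
    · subst he
      rw [ih (lo + 1) lo (by omega)]
      have : ¬ (lo + 1 ≤ lo ∧ lo < hi) := by omega
      simp [hlt]
    · rw [ih (lo + 1) i (by omega)]
      have hb : (lo == i) = false := by simp [he]
      have hne : lo ≠ i := he
      simp only [hb, Bool.false_eq_true, if_false]
      split_ifs with h1 h2
      all_goals try rfl
      all_goals omega

-- membership in pvRowRange is exactly A's window test, for rows 0 ≤ i < area_map_size
theorem mem_pvRowRange (start a m x i : Int) (hm : 0 < m) (h0 : 0 ≤ i) (h1 : i < a) :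
    (i ∈ pvRowRange start a m x) ↔ (start + m * i ≤ x ∧ x < start + m * i + a) := by
  unfold pvRowRange
  rw [PySem.List.mem_pyRange_one]
  have e : a - 1 - (x - start) = -((x - start) - a + 1) := by ring
  rw [e]
  have hlo : (-(PySem.Int.floordiv (-((x - start) - a + 1)) m) ≤ i) ↔ (x - start) - a + 1 ≤ m * i := by
    rw [neg_le, PySem.Int.le_floordiv_iff_mul_le hm, neg_mul, neg_le_neg_iff, mul_comm]
  have hhi : (i ≤ PySem.Int.floordiv (x - start) m) ↔ m * i ≤ x - start := by
    rw [PySem.Int.le_floordiv_iff_mul_le hm, mul_comm]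
  simp only [max_le_iff, Int.lt_add_one_iff, le_min_iff]
  rw [hlo, hhi]
  generalize m * i = p
  omega

theorem rowRange_filter (s a m x i : Int) :
    (pvRowRange s a m x).filter (fun j => j == i) =
      if i ∈ pvRowRange s a m x then [i] else [] := by
  conv_lhs => unfold pvRowRange
  conv_rhs => unfold pvRowRange
  rw [pyRange_filter_eq _ _ _ i rfl]
  simp only [PySem.List.mem_pyRange_one]

-- the bucket of row i collects exactly the cells whose row interval contains i, in input order
theorem buckets_getD (start a m : Int) (cells : List Int) (b : PySem.Dict Int (List Int)) (i : Int) :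
    (cells.foldl
      (fun b x => (pvRowRange start a m x).foldl (fun b j => b.modify j [] (fun l => l ++ [x])) b)
      b).getD i [] =
      b.getD i [] ++ cells.filter (fun x => decide (i ∈ pvRowRange start a m x)) := by
  induction cells generalizing b with
  | nil => simp
  | cons x xs ih =>
    rw [List.foldl_cons, ih, List.filter_cons]
    have inner : ((pvRowRange start a m x).foldl (fun b j => b.modify j [] (fun l => l ++ [x])) b).getD i []
        = b.getD i [] ++ if i ∈ pvRowRange start a m x then [x] else [] := by
      have e : (pvRowRange start a m x).foldl (fun b j => b.modify j [] (fun l => l ++ [x])) b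
          = ((pvRowRange start a m x).map (fun j => (j, x))).foldl
              (fun b p => b.modify p.1 [] (fun l => l ++ [p.2])) b := by
        rw [List.foldl_map]
      rw [e, PySem.Dict.getD_foldl_modify_append, List.filter_map]
      have : ((pvRowRange start a m x).filter ((fun p => p.1 == i) ∘ (fun j => (j, x))))
          = (pvRowRange start a m x).filter (fun j => j == i) := rfl
      rw [this, rowRange_filter]
      split_ifs <;> simp
    rw [inner]
    by_cases h : i ∈ pvRowRange start a m x
    · simp [h]
    · simp [h]

-- ===== VERDICT (by name: the statement is the Claim_ definition above) =====
theorem cut_map_area_spec : Claim_equal_cut_map_area := by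
  intro start all_cells area_map_size map_size _ hm
  unfold Spec_cut_map_area cut_map_area cut_map_area_alt
  simp only [List.map_id_fun', id]
  apply PySem.List.foldl_congr_mem
  intro acc i hi
  have hmem := PySem.List.mem_pyRange_one.mp hi
  rw [buckets_getD]
  have hempty : (PySem.Dict.empty : PySem.Dict Int (List Int)).getD i [] = [] := by
    simp [PySem.Dict.getD, PySem.Dict.get?, PySem.Dict.empty]
  rw [hempty, List.nil_append]
  congr 1
  apply List.filter_congr
  intro x hx
  have hwin := mem_pvRowRange start area_map_size map_size x i hm hmem.1 hmem.2
  by_cases h : i ∈ pvRowRange start area_map_size map_size x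
  · simp only [h, decide_true]
    have hc := hwin.mp h
    simp [hc.1, hc.2]
  · simp only [h, decide_false]
    have hc : ¬ (start + map_size * i ≤ x ∧ x < start + map_size * i + area_map_size) :=
      fun hh => h (hwin.mpr hh)
    rcases not_and_or.mp hc with h1 | h1 <;> simp [h1]
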